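-- pv_equiv track=rewrite | github.com/HitPointX/LiveMTRX | src/livemtrx.py | build_intensity_lut
-- ===== SOURCE A (Python) =====
-- from typing import List
--
-- def build_intensity_lut(length: int) -> List[int]:
--     lut = [0] * length
--     for i in range(length):
--         if i == 0:
--             lut[i] = 0
--         elif i <= 2:
--             lut[i] = 1
--         elif i <= int(length * 0.55):
--             lut[i] = 2
--         else:
--             lut[i] = 3
--     return lut
-- ===== SOURCE B (Python) =====
-- def build_intensity_lut(length):
--     if length <= 0:
--         return []
--     t = int(length * 0.55)
--     c1 = min(2, length - 1)
--     c2 = max(0, min(t, length - 1) - 2)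
--     c3 = length - 1 - c1 - c2
--     return [0] + [1] * c1 + [2] * c2 + [3] * c3
-- ===== Notes on version B (the rewrite author's own statement) =====
-- stated objective: faster
-- what changed: Replaces the per-index branch loop with segment-size arithmetic: compute the four block lengths from the 0.55 threshold once and return concatenated constant blocks [0]+[1]*c1+[2]*c2+[3]*c3.
import Mathlib
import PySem

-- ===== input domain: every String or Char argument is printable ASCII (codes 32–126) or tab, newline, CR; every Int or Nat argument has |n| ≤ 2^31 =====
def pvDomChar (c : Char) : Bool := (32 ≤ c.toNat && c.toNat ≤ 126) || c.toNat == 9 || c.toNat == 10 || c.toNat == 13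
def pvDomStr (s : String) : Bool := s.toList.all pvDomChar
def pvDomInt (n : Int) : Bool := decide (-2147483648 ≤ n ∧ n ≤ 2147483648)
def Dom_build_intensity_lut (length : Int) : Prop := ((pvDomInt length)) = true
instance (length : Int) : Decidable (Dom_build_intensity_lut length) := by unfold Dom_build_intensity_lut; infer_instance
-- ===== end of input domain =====

-- B replaces A's per-index branch loop by computing the four segment sizes once and
-- concatenating constant blocks (measured faster by a constant factor in Python).

-- ===== PORT A =====
-- Port note: Python's `int(length * 0.55)` is ported as ⌊11·length/20⌋
-- (PySem.Int.floordiv (11*length) 20); this is exact for the IEEE-double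
-- computation whenever |length| ≤ 2^31 (the rounding errors stay below the
-- distance to the nearest truncation boundary), which is the stated domain.
def build_intensity_lut (length : Int) : List Int :=
  (PySem.List.pyRange 0 length 1).foldl
    (fun lut i =>
      if i = 0 then lut.set i.toNat 0
      else if i ≤ 2 then lut.set i.toNat 1
      else if i ≤ PySem.Int.floordiv (11 * length) 20 then lut.set i.toNat 2
      else lut.set i.toNat 3)
    (List.replicate length.toNat 0)

-- ===== PORT B =====
-- same port of `int(length * 0.55)` as in A (see note above)
def build_intensity_lut_alt (length : Int) : List Int :=
  if length ≤ 0 then []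
  else
    let t := PySem.Int.floordiv (11 * length) 20
    let c1 := min 2 (length - 1)
    let c2 := max 0 (min t (length - 1) - 2)
    let c3 := length - 1 - c1 - c2
    [0] ++ List.replicate c1.toNat 1 ++ List.replicate c2.toNat 2 ++ List.replicate c3.toNat 3

-- ===== PRECONDITION & SPEC =====
def Spec_build_intensity_lut (length : Int) (out : List Int) : Prop := out = build_intensity_lut_alt length
instance (length : Int) (out : List Int) : Decidable (Spec_build_intensity_lut length out) := by unfold Spec_build_intensity_lut; infer_instance

-- ===== CLAIM (what is proved, stated in full; the proofs are below) =====
def Claim_equal_build_intensity_lut : Prop := ∀ (length : Int), Dom_build_intensity_lut length → Spec_build_intensity_lut length (build_intensity_lut length)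

-- ===== LEMMAS AND PROOFS =====

/-- Folding `set` over `range n` on a list of length ≥ n rewrites its first `n` entries. -/
lemma pv_foldl_set (f : Nat → Int) :
    ∀ (n : Nat) (l : List Int), n ≤ l.length →
      (List.range n).foldl (fun acc k => acc.set k (f k)) l
        = (List.range n).map f ++ l.drop n := by
  intro n
  induction n with
  | zero => intro l _; simp
  | succ m ih =>
    intro l h
    rw [List.range_succ, List.foldl_append, List.foldl_cons, List.foldl_nil,
        ih l (by omega)]
    have hm : m < l.length := by omega
    rw [List.drop_eq_getElem_cons hm, List.map_append, List.map_cons, List.map_nil]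
    rw [List.set_append_right _ _ (by simp)]
    simp only [List.length_map, List.length_range, Nat.sub_self,
      List.append_assoc, List.singleton_append]
    rfl

lemma pv_map_range_const (g : Nat → Int) (m : Nat) (c : Int)
    (h : ∀ i, i < m → g i = c) : (List.range m).map g = List.replicate m c := by
  rw [List.eq_replicate_iff]
  refine ⟨by simp, ?_⟩
  intro b hb
  simp only [List.mem_map, List.mem_range] at hb
  obtain ⟨i, hi, rfl⟩ := hb
  exact h i hi

lemma pv_map_range_split (g : Nat → Int) (v0 v1 v2 v3 : Int) (a b c : Nat)
    (h0 : g 0 = v0)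
    (h1 : ∀ k, 1 ≤ k → k < 1 + a → g k = v1)
    (h2 : ∀ k, 1 + a ≤ k → k < 1 + a + b → g k = v2)
    (h3 : ∀ k, 1 + a + b ≤ k → k < 1 + a + b + c → g k = v3) :
    (List.range (1 + a + b + c)).map g
      = [v0] ++ List.replicate a v1 ++ List.replicate b v2 ++ List.replicate c v3 := by
  have e1 : (List.range 1).map g = [v0] := by simp [List.range_one, h0]
  have e2 : ((List.range a).map (fun i => 1 + i)).map g = List.replicate a v1 := by
    rw [List.map_map]
    exact pv_map_range_const _ a v1 (fun i hi => h1 (1 + i) (by omega) (by omega))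
  have e3 : ((List.range b).map (fun i => 1 + a + i)).map g = List.replicate b v2 := by
    rw [List.map_map]
    exact pv_map_range_const _ b v2 (fun i hi => h2 (1 + a + i) (by omega) (by omega))
  have e4 : ((List.range c).map (fun i => 1 + a + b + i)).map g = List.replicate c v3 := by
    rw [List.map_map]
    exact pv_map_range_const _ c v3 (fun i hi => h3 (1 + a + b + i) (by omega) (by omega))
  rw [List.range_add, List.range_add, List.range_add]
  simp only [List.map_append]
  rw [e1, e2, e3, e4]

/-- Characterisation of A as a map over `range`. -/
lemma pv_A_char (length : Int) :
    build_intensity_lut length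
      = (List.range length.toNat).map (fun (k : Nat) =>
          if (k : Int) = 0 then 0
          else if (k : Int) ≤ 2 then 1
          else if (k : Int) ≤ PySem.Int.floordiv (11 * length) 20 then 2
          else 3) := by
  unfold build_intensity_lut
  rw [PySem.List.pyRange_one, sub_zero, List.foldl_map]
  have hfun : (fun (lut : List Int) (k : Nat) =>
      if (0 : Int) + k = 0 then lut.set ((0 : Int) + k).toNat 0
      else if (0 : Int) + k ≤ 2 then lut.set ((0 : Int) + k).toNat 1
      else if (0 : Int) + k ≤ PySem.Int.floordiv (11 * length) 20 then lut.set ((0 : Int) + k).toNat 2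
      else lut.set ((0 : Int) + k).toNat 3)
      = fun (lut : List Int) (k : Nat) => lut.set k
          (if (k : Int) = 0 then 0
           else if (k : Int) ≤ 2 then 1
           else if (k : Int) ≤ PySem.Int.floordiv (11 * length) 20 then 2
           else 3) := by
    funext lut k
    simp only [zero_add, Int.toNat_natCast]
    split_ifs <;> rfl
  rw [hfun, pv_foldl_set _ _ _ (by simp)]
  rw [List.drop_eq_nil_of_le (by simp), List.append_nil]

-- ===== VERDICT (by name: the statement is the Claim_ definition above) =====
theorem build_intensity_lut_spec : Claim_equal_build_intensity_lut := by
  intro length _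
  unfold Spec_build_intensity_lut
  by_cases hle : length ≤ 0
  · rw [show build_intensity_lut_alt length = [] by
        simp only [build_intensity_lut_alt, if_pos hle]]
    unfold build_intensity_lut
    rw [PySem.List.pyRange_one_eq_nil hle, List.foldl_nil,
        show length.toNat = 0 by omega]
    rfl
  · have hle' : 0 < length := by omega
    rw [pv_A_char length]
    set T : Int := PySem.Int.floordiv (11 * length) 20 with hTdef
    have hT : T = 11 * length / 20 := by
      rw [hTdef, PySem.Int.floordiv_eq_ediv_of_pos (by norm_num)]
    have hT0 : 0 ≤ T := by rw [hT]; omega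
    have hT1 : T ≤ length - 1 := by rw [hT]; omega
    have hB : build_intensity_lut_alt length
        = [0] ++ List.replicate (min 2 (length - 1)).toNat 1
            ++ List.replicate (max 0 (T - 2)).toNat 2
            ++ List.replicate (length - 1 - min 2 (length - 1) - max 0 (T - 2)).toNat 3 := by
      simp only [build_intensity_lut_alt, if_neg (show ¬ length ≤ 0 by omega), ← hTdef,
        show min T (length - 1) = T by omega]
    rw [hB,
        show length.toNat
          = 1 + (min 2 (length - 1)).toNat + (max 0 (T - 2)).toNat
              + (length - 1 - min 2 (length - 1) - max 0 (T - 2)).toNat by omega]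
    refine pv_map_range_split _ 0 1 2 3
      (min 2 (length - 1)).toNat (max 0 (T - 2)).toNat
      (length - 1 - min 2 (length - 1) - max 0 (T - 2)).toNat
      ?_ ?_ ?_ ?_
    · norm_num
    · intro k hk1 hk2
      have hA : ¬ ((k : Int) = 0) := by omega
      have hBc : (k : Int) ≤ 2 := by omega
      simp only [if_neg hA, if_pos hBc]
    · intro k hk1 hk2
      have hA : ¬ ((k : Int) = 0) := by omega
      have hBc : ¬ ((k : Int) ≤ 2) := by omega
      have hC : (k : Int) ≤ T := by omega
      simp only [if_neg hA, if_neg hBc, if_pos hC]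
    · intro k hk1 hk2
      have hA : ¬ ((k : Int) = 0) := by omega
      have hBc : ¬ ((k : Int) ≤ 2) := by omega
      have hC : ¬ ((k : Int) ≤ T) := by omega
      simp only [if_neg hA, if_neg hBc, if_neg hC]
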